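-- pv_equiv track=rewrite | github.com/kumarmanas/TAMP_COT_TL | src/calculation.py | transform_translations
-- ===== SOURCE A (Python) =====
-- def transform_translations(translation_data):
--     """
--     Transform translation data into separate arrays for processing.
--
--     Args:
--         translation_data: List of tuples containing translation information
--
--     Returns:
--         Structured arrays with separated translation components
--     """
--     # Initialize result containers
--     result = {
--         "keys": [],
--         "values": [],
--         "confidence": [],
--         "status": []
--     }
--
--     # Process each translation entry
--     for entry in translation_data:
--         if not entry or len(entry) < 4:
--             continue
--
--         # Extract components using indices
--         key = entry[0]
--         value_list = entry[1]
--         confidence_list = entry[2]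
--         status_list = entry[3]
--
--         # Add to result containers
--         result["keys"].append(key)
--         result["values"].append(value_list)
--         result["confidence"].append(confidence_list)
--         result["status"].append(status_list)
--
--     # Return as a list for backward compatibility
--     return [
--         result["keys"],
--         result["values"],
--         result["confidence"],
--         result["status"]
--     ]
-- ===== SOURCE B (Python) =====
-- def transform_translations(translation_data):
--     """Divide-and-conquer: transform each half of the list independently and
--     concatenate the four resulting columns (recursion depth O(log n))."""
--     def go(items):
--         if not items:
--             return [], [], [], []
--         if len(items) == 1:
--             e = items[0]
--             if e and len(e) >= 4:
--                 return [e[0]], [e[1]], [e[2]], [e[3]]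
--             return [], [], [], []
--         mid = len(items) // 2
--         left = go(items[:mid])
--         right = go(items[mid:])
--         return [left[i] + right[i] for i in range(4)]
--     keys, values, confidence, status = go(list(translation_data))
--     return [keys, values, confidence, status]
-- ===== Notes on version B (the rewrite author's own statement) =====
-- stated objective: alternative
-- what changed: Replaces A's single forward pass appending each field to four dict-held accumulators with a divide-and-conquer recursion: the list is split in half, each half transformed independently, and the four columns concatenated.
import Mathlib
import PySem

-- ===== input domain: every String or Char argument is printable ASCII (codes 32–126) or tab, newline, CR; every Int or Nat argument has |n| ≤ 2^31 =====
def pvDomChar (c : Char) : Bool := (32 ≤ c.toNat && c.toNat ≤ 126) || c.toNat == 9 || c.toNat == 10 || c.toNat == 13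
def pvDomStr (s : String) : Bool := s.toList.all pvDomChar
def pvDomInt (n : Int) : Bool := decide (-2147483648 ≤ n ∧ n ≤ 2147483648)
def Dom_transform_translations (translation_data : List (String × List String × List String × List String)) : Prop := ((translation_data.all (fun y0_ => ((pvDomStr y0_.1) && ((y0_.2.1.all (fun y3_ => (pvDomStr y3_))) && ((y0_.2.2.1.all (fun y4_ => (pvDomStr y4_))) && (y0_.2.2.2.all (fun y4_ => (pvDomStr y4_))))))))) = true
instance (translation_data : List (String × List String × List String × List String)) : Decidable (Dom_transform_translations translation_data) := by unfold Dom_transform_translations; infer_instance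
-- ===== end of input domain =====

-- B replaces A's forward accumulator loop by a divide-and-conquer recursion: split the
-- list in half, transform each half, concatenate the four columns; alternative algorithm.

-- ===== PORT A =====
-- The for loop with the dict of four accumulator lists, as a foldl over that state.
-- The Python guard `if not entry or len(entry) < 4: continue` is statically false here:
-- every element is a 4-tuple (truthy, len 4), so the loop body always appends.
def transform_translations (translation_data : List (String × List String × List String × List String)) : List String × List (List String) × List (List String) × List (List String) :=
  let result := translation_data.foldl
    (fun (acc : List String × List (List String) × List (List String) × List (List String)) entry =>
      (acc.1 ++ [entry.1], acc.2.1 ++ [entry.2.1], acc.2.2.1 ++ [entry.2.2.1], acc.2.2.2 ++ [entry.2.2.2]))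
    ([], [], [], [])
  (result.1, result.2.1, result.2.2.1, result.2.2.2)

-- ===== PORT B =====
-- go(items): empty and singleton base cases, else split at mid = len // 2, recurse on
-- both halves, concatenate the four columns. The guard `e and len(e) >= 4` is
-- statically true for 4-tuples, so the singleton case always yields the four fields.
def transform_translations_alt_go (items : List (String × List String × List String × List String)) : List String × List (List String) × List (List String) × List (List String) :=
  match items with
  | [] => ([], [], [], [])
  | [e] => ([e.1], [e.2.1], [e.2.2.1], [e.2.2.2])
  | x :: y :: rest =>
    let full := x :: y :: rest
    let mid := full.length / 2
    let left := transform_translations_alt_go (full.take mid)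
    let right := transform_translations_alt_go (full.drop mid)
    (left.1 ++ right.1, left.2.1 ++ right.2.1, left.2.2.1 ++ right.2.2.1, left.2.2.2 ++ right.2.2.2)
termination_by items.length
decreasing_by
  · simp; omega
  · simp; omega

def transform_translations_alt (translation_data : List (String × List String × List String × List String)) : List String × List (List String) × List (List String) × List (List String) :=
  let r := transform_translations_alt_go translation_data
  (r.1, r.2.1, r.2.2.1, r.2.2.2)

-- ===== PRECONDITION & SPEC =====
def Spec_transform_translations (translation_data : List (String × List String × List String × List String)) (out : List String × List (List String) × List (List String) × List (List String)) : Prop := out = transform_translations_alt translation_data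
instance (translation_data : List (String × List String × List String × List String)) (out : List String × List (List String) × List (List String) × List (List String)) : Decidable (Spec_transform_translations translation_data out) := by unfold Spec_transform_translations; infer_instance

-- ===== CLAIM (what is proved, stated in full; the proofs are below) =====
def Claim_equal_transform_translations : Prop := ∀ (translation_data : List (String × List String × List String × List String)), Dom_transform_translations translation_data → Spec_transform_translations translation_data (transform_translations translation_data)

-- ===== LEMMAS AND PROOFS =====

-- B's divide-and-conquer recursion computes the four column maps.
theorem pv_go_eq (l : List (String × List String × List String × List String)) :
    transform_translations_alt_go l
    = (l.map (·.1), l.map (·.2.1), l.map (·.2.2.1), l.map (·.2.2.2)) := by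
  fun_induction transform_translations_alt_go l with
  | case1 => simp
  | case2 e => simp
  | case3 x y rest full mid left right ihl ihr =>
    simp only [left, right, ihl, ihr, ← List.map_append, List.take_append_drop, full]

-- A's accumulator fold equals prefixing the accumulator to the four column maps.
theorem pv_fold_eq (l : List (String × List String × List String × List String))
    (a : List String × List (List String) × List (List String) × List (List String)) :
    l.foldl
      (fun (acc : List String × List (List String) × List (List String) × List (List String)) entry =>
        (acc.1 ++ [entry.1], acc.2.1 ++ [entry.2.1], acc.2.2.1 ++ [entry.2.2.1], acc.2.2.2 ++ [entry.2.2.2]))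
      a
    = (a.1 ++ l.map (·.1), a.2.1 ++ l.map (·.2.1), a.2.2.1 ++ l.map (·.2.2.1), a.2.2.2 ++ l.map (·.2.2.2)) := by
  induction l generalizing a with
  | nil => simp
  | cons e t ih => simp [List.foldl_cons, ih]

-- ===== VERDICT (by name: the statement is the Claim_ definition above) =====
theorem transform_translations_spec : Claim_equal_transform_translations := by
  intro l _
  unfold Spec_transform_translations transform_translations transform_translations_alt
  simp [pv_fold_eq, pv_go_eq]
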